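-- pv_equiv track=rewrite | github.com/shohanur-shoron/os-lab-solve | SCAN.py | sortPath
-- ===== SOURCE A (Python) =====
-- def sortPath(path, head):
--     smaller = []
--     larger = []
--
--     for i in path:
--         if i < head:
--             smaller.append(i)
--         else:
--             larger.append(i)
--
--     smaller.sort(reverse=True)
--     larger.sort()
--
--     return smaller + larger
-- ===== SOURCE B (Python) =====
-- def sortPath(path, head):
--     # One sort under a composite SCAN key: requests below the head come first
--     # (group bit False) in descending order (negated value), the rest ascending.
--     return sorted(path, key=lambda x: (x >= head, -x if x < head else x))
-- ===== Notes on version B (the rewrite author's own statement) =====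
-- stated objective: simpler
-- what changed: A's partition loop, two separate sorts (one reversed) and concatenation are replaced by a single sorted() call under a composite key (group bit x>=head, value negated below head) that realises the SCAN order directly.
import Mathlib
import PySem

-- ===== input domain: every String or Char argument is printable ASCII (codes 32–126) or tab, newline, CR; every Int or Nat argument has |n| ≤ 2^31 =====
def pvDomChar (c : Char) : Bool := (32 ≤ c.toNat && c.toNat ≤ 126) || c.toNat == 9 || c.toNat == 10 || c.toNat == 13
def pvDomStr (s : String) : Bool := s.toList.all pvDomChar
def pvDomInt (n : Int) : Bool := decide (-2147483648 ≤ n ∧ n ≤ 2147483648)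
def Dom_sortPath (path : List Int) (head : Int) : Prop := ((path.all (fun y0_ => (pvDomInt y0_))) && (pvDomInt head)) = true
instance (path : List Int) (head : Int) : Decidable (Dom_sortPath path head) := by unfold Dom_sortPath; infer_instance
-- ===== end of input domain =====

-- B replaces A's partition loop + two separate sorts + concatenation by one sorted() call under a composite SCAN key (objective: simpler).

-- ===== PORT A =====
def sortPath (path : List Int) (head : Int) : List Int :=
  -- for i in path: append to smaller / larger
  let sl := path.foldl
    (fun (acc : List Int × List Int) i =>
      if i < head then (acc.1 ++ [i], acc.2) else (acc.1, acc.2 ++ [i]))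
    ([], [])
  -- smaller.sort(reverse=True); larger.sort(); return smaller + larger
  PySem.List.sorted sl.1 (fun x => x) true ++ PySem.List.sorted sl.2 (fun x => x) false

-- ===== PORT B =====
def sortPath_alt (path : List Int) (head : Int) : List Int :=
  -- sorted(path, key=lambda x: (x >= head, -x if x < head else x))
  PySem.List.sorted2 path (fun x => decide (head ≤ x)) (fun x => if x < head then -x else x) false

-- ===== PRECONDITION & SPEC =====
def Spec_sortPath (path : List Int) (head : Int) (out : List Int) : Prop := out = sortPath_alt path head
instance (path : List Int) (head : Int) (out : List Int) : Decidable (Spec_sortPath path head out) := by unfold Spec_sortPath; infer_instance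

-- ===== CLAIM (what is proved, stated in full; the proofs are below) =====
def Claim_equal_sortPath : Prop := ∀ (path : List Int) (head : Int), Dom_sortPath path head → Spec_sortPath path head (sortPath path head)

-- ===== LEMMAS AND PROOFS =====

-- the comparison sorted2 uses for B's key, written out
def bfr (head a b : Int) : Bool :=
  decide ((decide (head ≤ a) : Bool) < (decide (head ≤ b) : Bool)) ||
    (!decide ((decide (head ≤ b) : Bool) < (decide (head ≤ a) : Bool)) &&
      decide ((if a < head then -a else a) < (if b < head then -b else b)))

theorem sortPath_alt_eq_foldl (path : List Int) (head : Int) :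
    sortPath_alt path head
      = path.foldl (fun acc x => PySem.List.insertBy (bfr head) x acc) [] := rfl

-- the non-strict lexicographic SCAN order, as a Prop
def LeK (head a b : Int) : Prop :=
  (a < head ∧ head ≤ b) ∨
    ((head ≤ a ↔ head ≤ b) ∧ (if a < head then -a else a) ≤ (if b < head then -b else b))

theorem bfr_false_iff (head a b : Int) : bfr head a b = false ↔ LeK head b a := by
  unfold bfr LeK
  by_cases ha : a < head
  · by_cases hb : b < head
    · simp [decide_eq_false (not_le.mpr ha), decide_eq_false (not_le.mpr hb), ha, hb]; omega
    · simp [decide_eq_false (not_le.mpr ha), decide_eq_true (not_lt.mp hb), ha, hb]; omega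
  · by_cases hb : b < head
    · simp [decide_eq_true (not_lt.mp ha), decide_eq_false (not_le.mpr hb), ha, hb]; omega
    · simp [decide_eq_true (not_lt.mp ha), decide_eq_true (not_lt.mp hb), ha, hb]; omega

theorem LeK_total (head a b : Int) : LeK head a b ∨ LeK head b a := by
  unfold LeK; split_ifs <;> omega

theorem LeK_trans (head a b c : Int) (h1 : LeK head a b) (h2 : LeK head b c) : LeK head a c := by
  unfold LeK at *; split_ifs at * <;> omega

theorem LeK_antisymm (head a b : Int) (h1 : LeK head a b) (h2 : LeK head b a) : a = b := by
  unfold LeK at *; split_ifs at * <;> omega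

theorem pairwise_insertBy (head : Int) (x : Int) (ys : List Int)
    (h : ys.Pairwise (LeK head)) :
    (PySem.List.insertBy (bfr head) x ys).Pairwise (LeK head) := by
  induction ys with
  | nil => simp [PySem.List.insertBy]
  | cons y ys ih =>
    rcases List.pairwise_cons.mp h with ⟨hy, hys⟩
    by_cases hxy : bfr head x y = true
    · have hyx : LeK head x y := by
        rcases LeK_total head x y with h' | h'
        · exact h'
        · exact absurd ((bfr_false_iff head x y).mpr h') (by simp [hxy])
      simp only [PySem.List.insertBy, hxy, if_true]
      refine List.pairwise_cons.mpr ⟨?_, h⟩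
      intro z hz
      rcases List.mem_cons.mp hz with heq | hz
      · exact heq ▸ hyx
      · exact LeK_trans head x y z hyx (hy z hz)
    · have hxy' : bfr head x y = false := by simpa using hxy
      simp only [PySem.List.insertBy, hxy', Bool.false_eq_true, if_false]
      refine List.pairwise_cons.mpr ⟨?_, ih hys⟩
      intro z hz
      rcases (PySem.List.mem_insertBy _ x z ys).mp hz with heq | hz
      · exact heq ▸ (bfr_false_iff head x y).mp hxy'
      · exact hy z hz

theorem pairwise_foldl_insertBy (head : Int) (xs acc : List Int)
    (h : acc.Pairwise (LeK head)) :
    (xs.foldl (fun acc x => PySem.List.insertBy (bfr head) x acc) acc).Pairwise (LeK head) := by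
  induction xs generalizing acc with
  | nil => exact h
  | cons x xs ih => exact ih _ (pairwise_insertBy head x acc h)

theorem perm_foldl_insertBy (head : Int) (xs acc : List Int) :
    (xs.foldl (fun acc x => PySem.List.insertBy (bfr head) x acc) acc).Perm (acc ++ xs) := by
  induction xs generalizing acc with
  | nil => simp
  | cons x xs ih =>
    refine (ih _).trans ?_
    have hins : (PySem.List.insertBy (bfr head) x acc).Perm (x :: acc) := by
      induction acc with
      | nil => simp [PySem.List.insertBy]
      | cons y ys ihy =>
        by_cases hb : bfr head x y = true
        · simp [PySem.List.insertBy, hb]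
        · simp only [PySem.List.insertBy, hb]
          exact (ihy.cons y).trans (List.Perm.swap x y ys)
    exact (hins.append_right xs).trans List.perm_middle.symm

-- A's loop builds exactly the two filters of path (in order).
theorem sortPath_foldl_partition (path : List Int) (head : Int) (a b : List Int) :
    path.foldl
      (fun (acc : List Int × List Int) i =>
        if i < head then (acc.1 ++ [i], acc.2) else (acc.1, acc.2 ++ [i]))
      (a, b)
    = (a ++ path.filter (fun x => decide (x < head)),
       b ++ path.filter (fun x => decide (head ≤ x))) := by
  induction path generalizing a b with
  | nil => simp
  | cons x xs ih =>
    by_cases h : x < head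
    · simp [List.foldl_cons, h, ih, not_le.mpr h]
    · simp [List.foldl_cons, h, ih, not_lt.mp h]

-- A's output is pairwise in the SCAN order
theorem sortPath_pairwise (path : List Int) (head : Int) :
    (sortPath path head).Pairwise (LeK head) := by
  unfold sortPath
  simp only [sortPath_foldl_partition, List.nil_append]
  rw [List.pairwise_append]
  refine ⟨?_, ?_, ?_⟩
  · refine List.Pairwise.imp_of_mem ?_
      (PySem.List.sorted_pairwise_rev (path.filter (fun x => decide (x < head))) (fun x => x))
    intro a b ha hb hba
    have ha' := List.of_mem_filter ((PySem.List.mem_sorted _ _ _ _).mp ha)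
    have hb' := List.of_mem_filter ((PySem.List.mem_sorted _ _ _ _).mp hb)
    simp only [decide_eq_true_eq] at ha' hb'
    unfold LeK; split_ifs <;> omega
  · refine List.Pairwise.imp_of_mem ?_
      (PySem.List.sorted_pairwise (path.filter (fun x => decide (head ≤ x))) (fun x => x))
    intro a b ha hb hab
    have ha' := List.of_mem_filter ((PySem.List.mem_sorted _ _ _ _).mp ha)
    have hb' := List.of_mem_filter ((PySem.List.mem_sorted _ _ _ _).mp hb)
    simp only [decide_eq_true_eq] at ha' hb'
    unfold LeK; split_ifs <;> omega
  · intro a ha b hb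
    have ha' := List.of_mem_filter ((PySem.List.mem_sorted _ _ _ _).mp ha)
    have hb' := List.of_mem_filter ((PySem.List.mem_sorted _ _ _ _).mp hb)
    simp only [decide_eq_true_eq] at ha' hb'
    unfold LeK; split_ifs <;> omega

-- both outputs are permutations of path
theorem sortPath_perm (path : List Int) (head : Int) : (sortPath path head).Perm path := by
  unfold sortPath
  simp only [sortPath_foldl_partition, List.nil_append]
  refine ((PySem.List.sorted_perm _ _ _).append (PySem.List.sorted_perm _ _ _)).trans ?_
  have := List.filter_append_perm (fun x => decide (x < head)) path
  refine List.Perm.trans ?_ this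
  refine List.Perm.append_left _ (List.Perm.of_eq ?_)
  refine (List.filter_congr ?_).symm
  intro x _
  rw [← decide_not, decide_eq_decide]
  omega

-- ===== VERDICT (by name: the statement is the Claim_ definition above) =====
theorem sortPath_spec : Claim_equal_sortPath := by
  intro path head _
  unfold Spec_sortPath
  rw [sortPath_alt_eq_foldl]
  refine List.Perm.eq_of_pairwise (le := LeK head) ?_ (sortPath_pairwise path head)
    (pairwise_foldl_insertBy head path [] (by simp)) ?_
  · intro a b _ _ h1 h2; exact LeK_antisymm head a b h1 h2
  · exact (sortPath_perm path head).trans ((perm_foldl_insertBy head path []).symm.trans (by simp))
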